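-- pv_equiv track=rewrite | github.com/co-tox/monix | monix/cli.py | _top_args
-- ===== SOURCE A (Python) =====
-- _TOP_METRICS = {"cpu", "memory", "mem", "disk", "all"}
--
-- def _top_args(args: list[str]) -> tuple[str, int]:
--     metric = "all"
--     count = 5
--     for a in args:
--         al = a.lower()
--         if al in _TOP_METRICS:
--             metric = al
--         else:
--             try:
--                 count = int(a)
--             except ValueError:
--                 pass
--     return metric, count
-- ===== SOURCE B (Python) =====
-- _TOP_METRICS = {"cpu", "memory", "mem", "disk", "all"}
--
--
-- def _parse_int(a):
--     try:
--         return int(a)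
--     except ValueError:
--         return None
--
--
-- def _top_args(args: list[str]) -> tuple[str, int]:
--     metrics = [a.lower() for a in args if a.lower() in _TOP_METRICS]
--     counts = [n for n in (_parse_int(a) for a in args
--                           if a.lower() not in _TOP_METRICS)
--               if n is not None]
--     metric = metrics[-1] if metrics else "all"
--     count = counts[-1] if counts else 5
--     return metric, count
-- ===== Notes on version B (the rewrite author's own statement) =====
-- stated objective: simpler
-- what changed: Replaces the single last-wins mutation loop by two independent filter-then-select passes (collect all metric matches and all parsed counts, take the last of each with a default).
import Mathlib
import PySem

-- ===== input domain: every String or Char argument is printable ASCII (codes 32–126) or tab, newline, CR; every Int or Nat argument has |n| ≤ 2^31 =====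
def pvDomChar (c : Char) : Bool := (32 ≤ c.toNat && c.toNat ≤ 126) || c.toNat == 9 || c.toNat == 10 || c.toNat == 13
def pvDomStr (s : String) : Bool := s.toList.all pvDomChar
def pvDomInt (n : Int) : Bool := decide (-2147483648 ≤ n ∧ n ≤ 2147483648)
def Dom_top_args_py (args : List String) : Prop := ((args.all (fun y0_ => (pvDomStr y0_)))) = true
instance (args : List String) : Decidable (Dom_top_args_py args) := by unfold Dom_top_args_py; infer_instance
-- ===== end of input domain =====

-- B replaces A's single last-wins mutation loop by two independent filter-then-select
-- passes (simpler decomposition); same return value, no side effects.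

-- _TOP_METRICS (shared constant)
def topMetrics : List String := ["cpu", "memory", "mem", "disk", "all"]

-- ===== PORT A =====
-- the loop: state (metric, count), last match wins
def top_args_py (args : List String) : String × Int :=
  args.foldl (fun st a =>
    let al := PySem.Str.lower a
    if topMetrics.contains al then (al, st.2)
    else
      match PySem.Int.ofStr? a with
      | some n => (st.1, n)
      | none => st) ("all", 5)

-- ===== PORT B =====
-- _parse_int: int(a) or None on ValueError
def parseInt? (a : String) : Option Int := PySem.Int.ofStr? a

def top_args_py_alt (args : List String) : String × Int :=
  let metrics := (args.filter (fun a => topMetrics.contains (PySem.Str.lower a))).map PySem.Str.lower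
  let counts := (args.filter (fun a => ! topMetrics.contains (PySem.Str.lower a))).filterMap parseInt?
  let metric := metrics.getLast?.getD "all"
  let count := counts.getLast?.getD 5
  (metric, count)

-- ===== PRECONDITION & SPEC =====
def Spec_top_args_py (args : List String) (out : String × Int) : Prop := out = top_args_py_alt args
instance (args : List String) (out : String × Int) : Decidable (Spec_top_args_py args out) := by unfold Spec_top_args_py; infer_instance

-- ===== CLAIM (what is proved, stated in full; the proofs are below) =====
def Claim_equal_top_args_py : Prop := ∀ (args : List String), Dom_top_args_py args → Spec_top_args_py args (top_args_py args)

-- ===== LEMMAS AND PROOFS =====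

lemma getLastD_cons {α : Type} (x d : α) (l : List α) :
    ((x :: l).getLast?.getD d) = l.getLast?.getD x := by
  cases l with
  | nil => rfl
  | cons y t =>
    rw [List.getLast?_cons_cons]
    cases h : (y :: t).getLast? with
    | none => simp at h
    | some z => simp

lemma top_fold (args : List String) (m : String) (c : Int) :
    args.foldl (fun st a =>
      let al := PySem.Str.lower a
      if topMetrics.contains al then (al, st.2)
      else
        match PySem.Int.ofStr? a with
        | some n => (st.1, n)
        | none => st) (m, c)
    = (((args.filter (fun a => topMetrics.contains (PySem.Str.lower a))).map PySem.Str.lower).getLast?.getD m,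
       ((args.filter (fun a => ! topMetrics.contains (PySem.Str.lower a))).filterMap parseInt?).getLast?.getD c) := by
  induction args generalizing m c with
  | nil => rfl
  | cons a rest ih =>
    simp only [List.foldl_cons, List.filter_cons]
    by_cases h : topMetrics.contains (PySem.Str.lower a)
    · simp only [h, if_pos, Bool.not_true, List.map_cons, ih, getLastD_cons]
      simp
    · have h' : topMetrics.contains (PySem.Str.lower a) = false := by
        simpa using h
      simp only [h', Bool.not_false, if_pos, List.filterMap_cons]
      cases hp : PySem.Int.ofStr? a with
      | some n =>
        simp only [ih, parseInt?, hp, getLastD_cons]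
        simp
      | none =>
        simp only [ih, parseInt?, hp]
        simp

-- ===== VERDICT (by name: the statement is the Claim_ definition above) =====
theorem top_args_py_spec : Claim_equal_top_args_py := by
  intro args _
  show top_args_py args = top_args_py_alt args
  simpa [top_args_py, top_args_py_alt] using top_fold args "all" 5
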